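-- pv_equiv track=rewrite | github.com/kylebebak/py-geohash-any | geohash.py | _nbr_next
-- ===== SOURCE A (Python) =====
-- def _nbr_next(geohash):
--     """Helper function for computing S/E neighbors."""
--     GH = list(geohash)
--     for i in range(len(GH)-1, -1, -1):
--         if GH[i] == '1':
--             GH[i] = '0'
--         else:
--             GH[i] = '1'
--             break
--     return GH
-- ===== SOURCE B (Python) =====
-- def _nbr_next(geohash):
--     """Helper function for computing S/E neighbors."""
--     kept = geohash.rstrip('1')
--     if not kept:
--         return ['0'] * len(geohash)
--     return list(kept[:-1]) + ['1'] + ['0'] * (len(geohash) - len(kept))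
-- ===== Notes on version B (the rewrite author's own statement) =====
-- stated objective: simpler
-- what changed: Replaces the in-place right-to-left flip loop with break by a single rstrip that strips the trailing one-bits, then builds the result as the kept prefix, a set bit, and trailing zeros by direct construction.
import Mathlib
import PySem

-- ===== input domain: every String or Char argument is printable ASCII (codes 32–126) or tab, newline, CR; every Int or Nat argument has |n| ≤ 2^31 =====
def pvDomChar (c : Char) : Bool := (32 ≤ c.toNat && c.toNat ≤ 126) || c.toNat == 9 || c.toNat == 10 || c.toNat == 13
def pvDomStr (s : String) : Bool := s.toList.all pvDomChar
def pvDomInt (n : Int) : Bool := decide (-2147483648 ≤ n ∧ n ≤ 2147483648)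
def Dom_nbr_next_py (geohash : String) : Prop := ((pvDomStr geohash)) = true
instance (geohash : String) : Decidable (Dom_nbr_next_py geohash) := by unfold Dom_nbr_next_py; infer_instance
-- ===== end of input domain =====

-- B replaces A's right-to-left flip-and-break loop by rstrip('1') plus direct list construction (objective: simpler).

-- ===== PORT A =====
-- A's reverse for-loop with break, transcribed from the right end of the list:
-- flip '1'→'0' until the first non-'1', set that to '1' and stop (rest unchanged)
def pvFlipA : List Char → List Char
  | [] => []
  | c :: rest => if c = '1' then '0' :: pvFlipA rest else '1' :: rest

def nbr_next_py (geohash : String) : List String :=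
  ((pvFlipA geohash.toList.reverse).reverse).map (fun c => String.ofList [c])

-- ===== PORT B =====
-- rstrip('1') ported by hand as reverse/dropWhile/reverse (exact: it removes exactly the trailing '1' characters)
def nbr_next_py_alt (geohash : String) : List String :=
  let l := geohash.toList
  let kept := (l.reverse.dropWhile (fun c => c = '1')).reverse
  if kept = [] then List.replicate l.length "0"
  else (kept.dropLast.map (fun c => String.ofList [c])) ++ ["1"] ++
       List.replicate (l.length - kept.length) "0"

-- ===== PRECONDITION & SPEC =====
def Spec_nbr_next_py (geohash : String) (out : List String) : Prop := out = nbr_next_py_alt geohash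
instance (geohash : String) (out : List String) : Decidable (Spec_nbr_next_py geohash out) := by unfold Spec_nbr_next_py; infer_instance

-- ===== CLAIM (what is proved, stated in full; the proofs are below) =====
def Claim_equal_nbr_next_py : Prop := ∀ (geohash : String), Dom_nbr_next_py geohash → Spec_nbr_next_py geohash (nbr_next_py geohash)

-- ===== LEMMAS AND PROOFS =====

-- A's loop output, characterised by the dropWhile decomposition of the reversed list
lemma pvFlipA_eq (r : List Char) :
    pvFlipA r =
      match r.dropWhile (fun c => c = '1') with
      | [] => List.replicate r.length '0'
      | _ :: rest =>
          List.replicate (r.length - (r.dropWhile (fun c => c = '1')).length) '0'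
            ++ '1' :: rest := by
  induction r with
  | nil => simp [pvFlipA]
  | cons c rest ih =>
      by_cases hc : c = '1'
      · simp [pvFlipA, hc]
        cases h : rest.dropWhile (fun c => c = '1') with
        | nil =>
            simp [h] at ih ⊢
            simp [ih, List.replicate_succ]
        | cons d tl =>
            simp [h] at ih ⊢
            have hlen : (rest.dropWhile (fun c => c = '1')).length ≤ rest.length :=
              List.length_dropWhile_le _ _
            rw [h] at hlen
            simp at hlen
            have : rest.length - tl.length = (rest.length - (tl.length + 1)) + 1 := by omega
            rw [ih, this, List.replicate_succ]
            simp
      · simp [pvFlipA, hc]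

lemma alt_eq (g : String) :
    nbr_next_py_alt g =
      (if (g.toList.reverse.dropWhile (fun c => c = '1')).reverse = []
       then List.replicate g.toList.length "0"
       else ((g.toList.reverse.dropWhile (fun c => c = '1')).reverse.dropLast.map (fun c => String.ofList [c])) ++ ["1"] ++
            List.replicate (g.toList.length - (g.toList.reverse.dropWhile (fun c => c = '1')).reverse.length) "0") := rfl

lemma main_eq (geohash : String) : nbr_next_py geohash = nbr_next_py_alt geohash := by
  rw [alt_eq]
  unfold nbr_next_py
  rw [pvFlipA_eq]
  cases h : geohash.toList.reverse.dropWhile (fun c => c = '1') with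
  | nil =>
      simp
  | cons c tl =>
      simp only [List.reverse_cons]
      rw [if_neg (by simp)]
      rw [List.dropLast_concat]
      simp [List.reverse_append, List.map_append, List.map_reverse]

-- ===== VERDICT (by name: the statement is the Claim_ definition above) =====
theorem nbr_next_py_spec : Claim_equal_nbr_next_py := by
  intro geohash _
  unfold Spec_nbr_next_py
  exact main_eq geohash
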